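-- pv_equiv track=rewrite | github.com/tagyoureit/unistore_performance_analysis | backend/core/table_profiler.py | _id_candidates
-- ===== SOURCE A (Python) =====
-- def _id_candidates(columns: dict[str, str]) -> list[str]:
--     """
--     Return ordered candidate key columns based on naming + type heuristics.
--     """
--
--     def _is_numeric_type(typ: str) -> bool:
--         t = str(typ or "").upper()
--         return any(x in t for x in ("NUMBER", "INT", "BIGINT", "DECIMAL"))
--
--     # Prefer exact ID if present (even if not numeric), but still allow other candidates.
--     candidates: list[str] = []
--     if "ID" in columns:
--         candidates.append("ID")
--
--     id_like: list[str] = []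
--     key_like: list[str] = []
--     contains_id: list[str] = []
--     contains_key: list[str] = []
--
--     for name, typ in columns.items():
--         n = str(name or "").upper()
--         if n == "ID":
--             continue
--         if not _is_numeric_type(typ):
--             continue
--         if n.endswith("_ID") or n.endswith("ID"):
--             id_like.append(n)
--             continue
--         if n.endswith("_KEY") or n.endswith("KEY"):
--             key_like.append(n)
--             continue
--         if "ID" in n:
--             contains_id.append(n)
--             continue
--         if "KEY" in n:
--             contains_key.append(n)
--             continue
--
--     for bucket in (id_like, key_like, contains_id, contains_key):
--         for c in bucket:
--             if c not in candidates:
--                 candidates.append(c)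
--     return candidates
-- ===== SOURCE B (Python) =====
-- def _id_candidates(columns: dict[str, str]) -> list[str]:
--     """Rank-and-stable-sort re-implementation: one pass assigns each
--     qualifying column a priority rank, a stable sort replaces the four
--     explicit buckets."""
--
--     NUMERIC = ("NUMBER", "INT", "BIGINT", "DECIMAL")
--
--     def _rank(n: str):
--         # endswith("_ID") is subsumed by endswith("ID"); same for KEY
--         if n.endswith("ID"):
--             return 0
--         if n.endswith("KEY"):
--             return 1
--         if "ID" in n:
--             return 2
--         if "KEY" in n:
--             return 3
--         return None
--
--     pairs = []
--     for name, typ in columns.items():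
--         n = str(name or "").upper()
--         if n == "ID":
--             continue
--         t = str(typ or "").upper()
--         if not any(x in t for x in NUMERIC):
--             continue
--         r = _rank(n)
--         if r is not None:
--             pairs.append((r, n))
--
--     pairs.sort(key=lambda p: p[0])  # stable: dict order kept within a rank
--
--     out = ["ID"] if "ID" in columns else []
--     for _, n in pairs:
--         if n not in out:
--             out.append(n)
--     return out
-- ===== Notes on version B (the rewrite author's own statement) =====
-- stated objective: alternative
-- what changed: Replaces A's four explicit bucket lists and the four-bucket flush loop by a single pass that assigns each qualifying column a numeric priority rank (noting endswith('_ID') is subsumed by endswith('ID'), same for KEY) followed by one stable sort on the rank; dedup happens in one flat loop over the sorted pairs.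
import Mathlib
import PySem

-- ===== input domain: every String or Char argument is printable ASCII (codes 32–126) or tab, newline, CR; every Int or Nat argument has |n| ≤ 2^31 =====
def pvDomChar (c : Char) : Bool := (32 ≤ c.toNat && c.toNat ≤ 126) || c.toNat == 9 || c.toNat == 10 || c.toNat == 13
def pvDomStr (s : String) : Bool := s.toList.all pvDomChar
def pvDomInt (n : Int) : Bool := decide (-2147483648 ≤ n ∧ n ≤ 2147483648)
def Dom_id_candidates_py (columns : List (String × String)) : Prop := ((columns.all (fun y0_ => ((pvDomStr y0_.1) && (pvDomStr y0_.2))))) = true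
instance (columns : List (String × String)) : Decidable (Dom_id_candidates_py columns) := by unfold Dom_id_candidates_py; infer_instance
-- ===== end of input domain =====

-- B replaces A's four bucket lists by rank-tagged pairs and one stable sort on the rank (alternative decomposition, same cost).

-- ===== PORT A =====
-- helper _is_numeric_type (identical text in both Pythons); str(typ or "") = typ for str inputs ("" stays "")
def pvIsNum (typ : String) : Bool :=
  let t := PySem.Str.upper typ
  PySem.Str.isIn "NUMBER" t || PySem.Str.isIn "INT" t || PySem.Str.isIn "BIGINT" t || PySem.Str.isIn "DECIMAL" t

-- 'if c not in out: out.append(c)' (identical text in both Pythons' final loops)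
def pvDedupStep (acc : List String) (c : String) : List String :=
  if acc.contains c then acc else acc ++ [c]

-- the body of A's classification loop; state = (id_like, key_like, contains_id, contains_key)
def pvAStep (st : List String × List String × List String × List String) (col : String × String) :
    List String × List String × List String × List String :=
  let n := PySem.Str.upper col.1          -- str(name or "").upper() = name.upper() for str inputs
  if n == "ID" then st
  else if !pvIsNum col.2 then st
  else if PySem.Str.endswith n "_ID" || PySem.Str.endswith n "ID" then (st.1 ++ [n], st.2.1, st.2.2.1, st.2.2.2)
  else if PySem.Str.endswith n "_KEY" || PySem.Str.endswith n "KEY" then (st.1, st.2.1 ++ [n], st.2.2.1, st.2.2.2)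
  else if PySem.Str.isIn "ID" n then (st.1, st.2.1, st.2.2.1 ++ [n], st.2.2.2)
  else if PySem.Str.isIn "KEY" n then (st.1, st.2.1, st.2.2.1, st.2.2.2 ++ [n])
  else st

def id_candidates_py (columns : List (String × String)) : List String :=
  let candidates := if columns.any (fun c => c.1 == "ID") then ["ID"] else []
  let st := columns.foldl pvAStep ([], [], [], [])
  [st.1, st.2.1, st.2.2.1, st.2.2.2].foldl
    (fun cand bucket => bucket.foldl pvDedupStep cand) candidates

-- ===== PORT B =====
-- Source B's _rank helper
def pvRank (n : String) : Option Int :=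
  if PySem.Str.endswith n "ID" then some 0
  else if PySem.Str.endswith n "KEY" then some 1
  else if PySem.Str.isIn "ID" n then some 2
  else if PySem.Str.isIn "KEY" n then some 3
  else none

def id_candidates_py_alt (columns : List (String × String)) : List String :=
  let pairs := columns.foldl (fun acc col =>
      let n := PySem.Str.upper col.1
      if n == "ID" then acc
      else if !pvIsNum col.2 then acc
      else match pvRank n with
        | some r => acc ++ [(r, n)]
        | none => acc) ([] : List (Int × String))
  let sortedPairs := PySem.List.sorted pairs (fun p => p.1) false   -- pairs.sort(key=lambda p: p[0]), stable
  let out := if columns.any (fun c => c.1 == "ID") then ["ID"] else []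
  sortedPairs.foldl (fun acc p => pvDedupStep acc p.2) out

-- ===== PRECONDITION & SPEC =====
def Spec_id_candidates_py (columns : List (String × String)) (out : List String) : Prop := out = id_candidates_py_alt columns
instance (columns : List (String × String)) (out : List String) : Decidable (Spec_id_candidates_py columns out) := by unfold Spec_id_candidates_py; infer_instance

-- ===== CLAIM (what is proved, stated in full; the proofs are below) =====
def Claim_equal_id_candidates_py : Prop := ∀ (columns : List (String × String)), Dom_id_candidates_py columns → Spec_id_candidates_py columns (id_candidates_py columns)

-- ===== LEMMAS AND PROOFS =====

-- what B emits for one column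
def pvG (col : String × String) : List (Int × String) :=
  let n := PySem.Str.upper col.1
  if n == "ID" then []
  else if !pvIsNum col.2 then []
  else match pvRank n with
    | some r => [(r, n)]
    | none => []

-- what A's bucket k receives for one column
def pvGk (k : Int) (col : String × String) : List String :=
  ((pvG col).filter (fun p => p.1 == k)).map Prod.snd

theorem pv_endswith_trans (n : String) (p q : String) (hpq : q.toList <:+ p.toList)
    (h : PySem.Str.endswith n p = true) : PySem.Str.endswith n q = true := by
  simp only [PySem.Str.endswith_eq, PySem.Chars.endswith_iff] at h ⊢
  exact hpq.trans h

theorem pv_or_ID (n : String) :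
    (PySem.Str.endswith n "_ID" || PySem.Str.endswith n "ID") = PySem.Str.endswith n "ID" := by
  cases h : PySem.Str.endswith n "ID" with
  | true => simp
  | false =>
    simp only [Bool.or_false]
    cases h' : PySem.Str.endswith n "_ID" with
    | false => rfl
    | true => rw [pv_endswith_trans n "_ID" "ID" (by decide) h'] at h; exact h.symm ▸ rfl

theorem pv_or_KEY (n : String) :
    (PySem.Str.endswith n "_KEY" || PySem.Str.endswith n "KEY") = PySem.Str.endswith n "KEY" := by
  cases h : PySem.Str.endswith n "KEY" with
  | true => simp
  | false =>
    simp only [Bool.or_false]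
    cases h' : PySem.Str.endswith n "_KEY" with
    | false => rfl
    | true => rw [pv_endswith_trans n "_KEY" "KEY" (by decide) h'] at h; exact h.symm ▸ rfl

-- one step of A's loop, expressed through B's per-column emissions
theorem pv_step_eq (st : List String × List String × List String × List String) (col : String × String) :
    pvAStep st col = (st.1 ++ pvGk 0 col, st.2.1 ++ pvGk 1 col, st.2.2.1 ++ pvGk 2 col, st.2.2.2 ++ pvGk 3 col) := by
  simp only [pvAStep, pvGk, pvG, pvRank, pv_or_ID, pv_or_KEY]
  split_ifs <;> simp

-- A's whole loop, expressed through B's per-column emissions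
theorem pv_buckets (cs : List (String × String)) (b0 b1 b2 b3 : List String) :
    cs.foldl pvAStep (b0, b1, b2, b3) =
      (b0 ++ cs.flatMap (pvGk 0), b1 ++ cs.flatMap (pvGk 1), b2 ++ cs.flatMap (pvGk 2), b3 ++ cs.flatMap (pvGk 3)) := by
  induction cs generalizing b0 b1 b2 b3 with
  | nil => simp
  | cons x rest ih =>
    rw [List.foldl_cons, pv_step_eq, ih]
    simp [List.flatMap_cons, List.append_assoc]

-- B's pair-building loop is a flatMap
theorem pv_pairs (cs : List (String × String)) (acc : List (Int × String)) :
    cs.foldl (fun acc col =>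
      let n := PySem.Str.upper col.1
      if n == "ID" then acc
      else if !pvIsNum col.2 then acc
      else match pvRank n with
        | some r => acc ++ [(r, n)]
        | none => acc) acc = acc ++ cs.flatMap pvG := by
  induction cs generalizing acc with
  | nil => simp
  | cons x rest ih =>
    rw [List.foldl_cons, ih]
    have hx : (let n := PySem.Str.upper x.1
      if n == "ID" then acc
      else if !pvIsNum x.2 then acc
      else match pvRank n with
        | some r => acc ++ [(r, n)]
        | none => acc) = acc ++ pvG x := by
      simp only [pvG]
      cases hr : pvRank (PySem.Str.upper x.1) <;> split_ifs <;> simp_all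
    rw [hx, List.flatMap_cons, List.append_assoc]

-- every rank B emits is 0, 1, 2 or 3
theorem pv_rank_mem (cs : List (String × String)) (p : Int × String) (hp : p ∈ cs.flatMap pvG) :
    p.1 = 0 ∨ p.1 = 1 ∨ p.1 = 2 ∨ p.1 = 3 := by
  rw [List.mem_flatMap] at hp
  obtain ⟨x, -, hx⟩ := hp
  simp only [pvG] at hx
  split_ifs at hx
  · simp at hx
  · simp at hx
  · cases hr : pvRank (PySem.Str.upper x.1) with
    | none => rw [hr] at hx; simp at hx
    | some r =>
      rw [hr] at hx
      simp only [List.mem_singleton] at hx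
      subst hx
      simp only [pvRank] at hr
      split_ifs at hr <;> simp_all

-- insertBy past a block that x does not go before
theorem pv_insertBy_append {α : Type} (before : α → α → Bool) (x : α) (A B : List α)
    (hA : ∀ a ∈ A, before x a = false) :
    PySem.List.insertBy before x (A ++ B) = A ++ PySem.List.insertBy before x B := by
  induction A with
  | nil => simp
  | cons a as ih =>
    have ha : before x a = false := hA a (by simp)
    have step : PySem.List.insertBy before x ((a :: as) ++ B)
        = a :: PySem.List.insertBy before x (as ++ B) := by
      rw [List.cons_append,
        show PySem.List.insertBy before x (a :: (as ++ B))
            = if before x a then x :: a :: (as ++ B) else a :: PySem.List.insertBy before x (as ++ B) from rfl,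
        ha]
      simp
    rw [step, ih (fun a' ha' => hA a' (by simp [ha']))]
    simp

-- insertBy before a block it goes before entirely
theorem pv_insertBy_front {α : Type} (before : α → α → Bool) (x : α) (B : List α)
    (hB : ∀ b ∈ B, before x b = true) :
    PySem.List.insertBy before x B = x :: B := by
  cases B with
  | nil => rfl
  | cons b bs =>
    rw [show PySem.List.insertBy before x (b :: bs)
        = if before x b then x :: b :: bs else b :: PySem.List.insertBy before x bs from rfl,
      hB b (by simp)]
    simp

-- rank of every member of a rank class
theorem pv_mem_rank (ps : List (Int × String)) (k : Int) (a : Int × String)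
    (ha : a ∈ ps.filter (fun p => p.1 == k)) : a.1 = k := by
  have := (List.mem_filter.1 ha).2
  simpa using this

-- stable sort on ranks 0..3 is the concatenation of the four rank classes
theorem pv_sorted_rank (ps : List (Int × String))
    (h : ∀ p ∈ ps, p.1 = 0 ∨ p.1 = 1 ∨ p.1 = 2 ∨ p.1 = 3) :
    PySem.List.sorted ps (fun p => p.1) false =
      ps.filter (fun p => p.1 == 0) ++ ps.filter (fun p => p.1 == 1) ++
      ps.filter (fun p => p.1 == 2) ++ ps.filter (fun p => p.1 == 3) := by
  induction ps using List.reverseRecOn with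
  | nil => rfl
  | append_singleton ps x ih =>
    have hps : ∀ p ∈ ps, p.1 = 0 ∨ p.1 = 1 ∨ p.1 = 2 ∨ p.1 = 3 := fun p hp => h p (by simp [hp])
    have hx := h x (by simp)
    rw [PySem.List.sorted_eq_foldl_insertBy, List.foldl_append, List.foldl_cons, List.foldl_nil,
      ← PySem.List.sorted_eq_foldl_insertBy, ih hps]
    simp only [List.filter_append, List.filter_cons, List.filter_nil, List.append_assoc]
    rcases hx with hx | hx | hx | hx <;> simp only [hx]
    · rw [pv_insertBy_append _ x (ps.filter (fun p => p.1 == 0))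
          (ps.filter (fun p => p.1 == 1) ++ (ps.filter (fun p => p.1 == 2) ++ ps.filter (fun p => p.1 == 3)))
          (by intro a ha; have := pv_mem_rank ps 0 a ha; simp [this, hx]),
        pv_insertBy_front _ x _ (by
          intro b hb
          rcases List.mem_append.1 hb with hb | hb
          · have := pv_mem_rank ps 1 b hb; simp [this, hx]
          · rcases List.mem_append.1 hb with hb | hb
            · have := pv_mem_rank ps 2 b hb; simp [this, hx]
            · have := pv_mem_rank ps 3 b hb; simp [this, hx])]
      simp
    · rw [pv_insertBy_append _ x (ps.filter (fun p => p.1 == 0)) _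
          (by intro a ha; have := pv_mem_rank ps 0 a ha; simp [this, hx]),
        pv_insertBy_append _ x (ps.filter (fun p => p.1 == 1)) _
          (by intro a ha; have := pv_mem_rank ps 1 a ha; simp [this, hx]),
        pv_insertBy_front _ x _ (by
          intro b hb
          rcases List.mem_append.1 hb with hb | hb
          · have := pv_mem_rank ps 2 b hb; simp [this, hx]
          · have := pv_mem_rank ps 3 b hb; simp [this, hx])]
      simp
    · rw [pv_insertBy_append _ x (ps.filter (fun p => p.1 == 0)) _
          (by intro a ha; have := pv_mem_rank ps 0 a ha; simp [this, hx]),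
        pv_insertBy_append _ x (ps.filter (fun p => p.1 == 1)) _
          (by intro a ha; have := pv_mem_rank ps 1 a ha; simp [this, hx]),
        pv_insertBy_append _ x (ps.filter (fun p => p.1 == 2)) _
          (by intro a ha; have := pv_mem_rank ps 2 a ha; simp [this, hx]),
        pv_insertBy_front _ x _ (by
          intro b hb; have := pv_mem_rank ps 3 b hb; simp [this, hx])]
      simp
    · rw [pv_insertBy_append _ x (ps.filter (fun p => p.1 == 0)) _
          (by intro a ha; have := pv_mem_rank ps 0 a ha; simp [this, hx]),
        pv_insertBy_append _ x (ps.filter (fun p => p.1 == 1)) _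
          (by intro a ha; have := pv_mem_rank ps 1 a ha; simp [this, hx]),
        pv_insertBy_append _ x (ps.filter (fun p => p.1 == 2)) _
          (by intro a ha; have := pv_mem_rank ps 2 a ha; simp [this, hx]),
        PySem.List.insertBy_of_forall_not_before _ x _ (by
          intro b hb; have := pv_mem_rank ps 3 b hb; simp [this, hx])]
      simp

-- per-rank class of B's pairs = A's bucket stream
theorem pv_flat_k (cs : List (String × String)) (k : Int) :
    ((cs.flatMap pvG).filter (fun p => p.1 == k)).map Prod.snd = cs.flatMap (pvGk k) := by
  induction cs with
  | nil => rfl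
  | cons x rest ih => simp [List.flatMap_cons, List.filter_append, ih, pvGk]

-- B's dedup loop over pairs reads only the second components
theorem pv_foldl_snd (init : List String) (l : List (Int × String)) :
    List.foldl (fun acc p => pvDedupStep acc p.2) init l
      = List.foldl pvDedupStep init (l.map Prod.snd) := by
  induction l generalizing init with
  | nil => rfl
  | cons a t ih => simp only [List.foldl_cons, List.map_cons]; rw [ih]

-- ===== VERDICT (by name: the statement is the Claim_ definition above) =====
theorem id_candidates_py_spec : Claim_equal_id_candidates_py := by
  intro columns _
  unfold Spec_id_candidates_py
  show id_candidates_py columns = id_candidates_py_alt columns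
  simp only [id_candidates_py, id_candidates_py_alt]
  rw [pv_buckets, pv_pairs]
  simp only [List.nil_append]
  rw [pv_sorted_rank _ (fun p hp => pv_rank_mem columns p hp), pv_foldl_snd]
  simp only [List.map_append, pv_flat_k, List.foldl_cons, List.foldl_nil, List.foldl_append]
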